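-- pv_equiv track=rewrite | github.com/Akshat-07-ux/GfG-Questions | Difficulty: Medium/Power Set/power-set.py | AllPossibleStrings
-- ===== SOURCE A (Python) =====
-- def AllPossibleStrings(s):
--     n = len(s)
--     subsequences = []
--
--     # Generate all possible subsequences using bitmasking
--     for i in range(1, 1 << n):  # 1 << n is 2^n, excluding 0 for non-empty subsequences
--         subsequence = []
--         for j in range(n):
--             if i & (1 << j):  # If the jth bit is set in i, include s[j]
--                 subsequence.append(s[j])
--         subsequences.append(''.join(subsequence))
--
--     # Sort the subsequences lexicographically
--     subsequences.sort()
--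
--     return subsequences
-- ===== SOURCE B (Python) =====
-- def AllPossibleStrings(s):
--     # Iterative doubling: res holds every subsequence (as a list of chars) of the prefix scanned so far.
--     res = [[]]
--     for ch in s:
--         res = res + [t + [ch] for t in res]
--     return sorted(''.join(t) for t in res[1:])
-- ===== Notes on version B (the rewrite author's own statement) =====
-- stated objective: alternative
-- what changed: Replaces A's per-mask inner bit-test loop (for each of the 2^n masks, scan all n bits) by iterative doubling: one pass over the characters, each step appending ch to every subsequence collected so far, so each subsequence is produced by a single list append.
import Mathlib
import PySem

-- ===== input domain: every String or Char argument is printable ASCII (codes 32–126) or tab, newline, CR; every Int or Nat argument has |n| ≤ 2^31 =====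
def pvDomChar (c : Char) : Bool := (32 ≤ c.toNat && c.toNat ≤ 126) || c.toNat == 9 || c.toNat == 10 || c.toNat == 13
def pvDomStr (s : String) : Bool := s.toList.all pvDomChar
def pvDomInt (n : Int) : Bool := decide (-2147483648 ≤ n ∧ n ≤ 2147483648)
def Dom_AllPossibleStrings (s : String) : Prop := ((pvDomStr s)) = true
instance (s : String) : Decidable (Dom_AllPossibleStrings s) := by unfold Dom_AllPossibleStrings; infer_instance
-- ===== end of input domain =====

-- B replaces A's per-mask inner bit loop by iterative doubling of the subsequence list; same sorted output.

-- ===== PORT A =====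
-- s[j]: j always lies in range(0, len(s)), so s[j] is PySem.List.pyGetD on s.toList (in-range total form);
-- ''.join over a list of single characters is exactly the string of those characters (String.ofList).
def AllPossibleStrings (s : String) : List String :=
  let n : Int := PySem.Str.len s
  let subsequences : List String :=
    (PySem.List.pyRange 1 ((1 : Int) <<< n.toNat) 1).foldl (fun subsequences i =>
      let subsequence : List Char :=
        (PySem.List.pyRange 0 n 1).foldl (fun subsequence j =>
          if PySem.Int.band i ((1 : Int) <<< j.toNat) ≠ 0 then
            subsequence ++ [PySem.List.pyGetD s.toList j ' ']
          else subsequence) []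
      subsequences ++ [String.ofList subsequence]) []
  PySem.List.sorted subsequences (fun x => x) false

-- ===== PORT B =====
-- ''.join(t) over a list of characters t is exactly String.ofList t.
def AllPossibleStrings_alt (s : String) : List String :=
  let res : List (List Char) :=
    s.toList.foldl (fun res ch => res ++ res.map (fun t => t ++ [ch])) [[]]
  PySem.List.sorted ((PySem.List.slice res (some 1) none).map (fun t => String.ofList t))
    (fun x => x) false

-- ===== PRECONDITION & SPEC =====
def Spec_AllPossibleStrings (s : String) (out : List String) : Prop := out = AllPossibleStrings_alt s
instance (s : String) (out : List String) : Decidable (Spec_AllPossibleStrings s out) := by unfold Spec_AllPossibleStrings; infer_instance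

-- ===== CLAIM (what is proved, stated in full; the proofs are below) =====
def Claim_equal_AllPossibleStrings : Prop := ∀ (s : String), Dom_AllPossibleStrings s → Spec_AllPossibleStrings s (AllPossibleStrings s)

-- ===== LEMMAS AND PROOFS =====

def pvMask : List Char → Nat → List Char
  | [], _ => []
  | c :: cs, m => (if m % 2 = 1 then [c] else []) ++ pvMask cs (m / 2)
theorem pvMask_snoc (ds : List Char) (c : Char) (m : Nat) :
    pvMask (ds ++ [c]) m = pvMask ds m ++ (if m.testBit ds.length then [c] else []) := by
  induction ds generalizing m with
  | nil => simp [pvMask, Nat.testBit_zero]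
  | cons d ds ih => simp [pvMask, ih, Nat.testBit_add_one]
theorem pvMask_add_pow (cs : List Char) (m : Nat) :
    pvMask cs (m + 2 ^ cs.length) = pvMask cs m := by
  induction cs generalizing m with
  | nil => rfl
  | cons c cs ih =>
    have h1 : (m + 2 ^ (cs.length + 1)) % 2 = m % 2 := by rw [pow_succ]; omega
    have h2 : (m + 2 ^ (cs.length + 1)) / 2 = m / 2 + 2 ^ cs.length := by rw [pow_succ]; omega
    simp only [pvMask, List.length_cons, h1, h2, ih]
theorem pvGenB (cs : List Char) :
    cs.foldl (fun res ch => res ++ res.map (fun t => t ++ [ch])) [[]]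
      = (List.range (2 ^ cs.length)).map (pvMask cs) := by
  induction cs using List.reverseRecOn with
  | nil => simp [pvMask]
  | append_singleton ds c ih =>
    rw [List.foldl_append, List.foldl_cons, List.foldl_nil, ih]
    have hlen : 2 ^ (ds ++ [c]).length = 2 ^ ds.length + 2 ^ ds.length := by
      simp [pow_succ]; ring
    rw [hlen, List.range_add, List.map_append]
    congr 1
    · apply (List.map_congr_left _).symm
      intro i hi
      rw [List.mem_range] at hi
      rw [pvMask_snoc, Nat.testBit_lt_two_pow hi]
      simp
    · simp only [List.map_map]
      apply List.map_congr_left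
      intro i hi
      rw [List.mem_range] at hi
      simp only [Function.comp_apply]
      rw [pvMask_snoc]
      have ht : (2 ^ ds.length + i).testBit ds.length = true := by
        rw [Nat.testBit_two_pow_add_eq, Nat.testBit_lt_two_pow hi]; rfl
      rw [ht, Nat.add_comm (2 ^ ds.length) i, pvMask_add_pow]
      simp
theorem pvMask_filter (cs : List Char) (m : Nat) :
    ((List.range cs.length).filter (fun j => m.testBit j)).map (fun j => cs.getD j ' ')
      = pvMask cs m := by
  induction cs generalizing m with
  | nil => simp [pvMask]
  | cons c cs ih =>
    rw [List.length_cons, List.range_succ_eq_map]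
    have ih' := ih (m / 2)
    simp only [List.getD_eq_getElem?_getD] at ih' ⊢
    by_cases hb : m % 2 = 1 <;>
      simp [pvMask, List.filter_map, Function.comp_def, Nat.testBit_add_one,
        Nat.testBit_zero, hb, ih']
theorem pvInnerA (cs : List Char) (i : Int) (hi : 0 ≤ i) :
    (PySem.List.pyRange 0 (cs.length : Int) 1).foldl
      (fun subsequence j =>
        if PySem.Int.band i ((1 : Int) <<< j.toNat) ≠ 0 then
          subsequence ++ [PySem.List.pyGetD cs j ' ']
        else subsequence) []
    = pvMask cs i.toNat := by
  have hcond : ∀ k : Nat, (PySem.Int.band i ((1 : Int) <<< ((k : Nat) : Int)) ≠ 0) ↔ i.toNat.testBit k := by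
    intro k
    rw [Int.one_shiftLeft, PySem.Int.band_of_nonneg hi (Int.natCast_nonneg _), Int.toNat_natCast,
      Nat.and_two_pow]
    cases hb : i.toNat.testBit k <;> simp
  have hrange : PySem.List.pyRange 0 (cs.length : Int) 1
      = (List.range cs.length).map (fun k => Int.ofNat k) := by
    rw [PySem.List.pyRange_one]; simp
  rw [hrange, List.foldl_map]
  rw [PySem.List.foldl_congr_mem _ _
    (fun subsequence k =>
      if i.toNat.testBit k then subsequence ++ [cs.getD k ' '] else subsequence) _
    (by
      intro sub k _
      by_cases hb : i.toNat.testBit k <;>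
        simp [hcond, hb, PySem.List.pyGetD_natCast])]
  rw [PySem.List.foldl_append_if, List.nil_append, pvMask_filter]


-- ===== VERDICT (by name: the statement is the Claim_ definition above) =====
theorem AllPossibleStrings_spec : Claim_equal_AllPossibleStrings := by
  intro s _
  unfold Spec_AllPossibleStrings AllPossibleStrings AllPossibleStrings_alt
  simp only [PySem.Str.len_eq, Int.toNat_natCast]
  rw [PySem.List.foldl_append_singleton_eq_map]
  rw [pvGenB, PySem.List.slice_from_one, List.nil_append]
  generalize s.toList = cs
  congr 1
  have hsh : (1 : Int) <<< cs.length = ((2 ^ cs.length : Nat) : Int) := by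
    simp [Int.shiftLeft_eq]
  rw [hsh]
  rw [PySem.List.pyRange_one 1 ((2 ^ cs.length : Nat) : Int), List.map_map]
  have hcnt : (((2 ^ cs.length : Nat) : Int) - 1).toNat = 2 ^ cs.length - 1 := by omega
  rw [hcnt]
  have hsplit : List.range (2 ^ cs.length)
      = 0 :: (List.range (2 ^ cs.length - 1)).map (fun k => 1 + k) := by
    have h1 : 2 ^ cs.length = 1 + (2 ^ cs.length - 1) := by
      have := Nat.one_le_two_pow (n := cs.length); omega
    conv_lhs => rw [h1]
    rw [List.range_add]
    simp
  rw [hsplit]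
  simp only [List.map_cons, List.tail_cons, List.map_map]
  apply List.map_congr_left
  intro k _
  simp only [Function.comp_apply]
  rw [pvInnerA cs (1 + (k : Int)) (by omega)]
  congr 1
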